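-- pv_equiv track=rewrite | github.com/tjcreedy/biotools | fixtrnas.py | closestbases
-- ===== SOURCE A (Python) =====
-- from collections import defaultdict, Counter
--
-- def gapped_position(seq, n):
--     """Return the position in the gapped sequence corresponding to the given position in the
--     ungapped sequence. If the given position exceeds the number of ungapped bases, returns
--     None"""
--     i = -1
--     for c, b in enumerate(seq):
--         if b != '-':
--             i += 1
--         if i == n:
--             return c
--     return None
--
-- def closestbases(seq, n, nbases=1):
--         segments = {'left': seq[:n][::-1],
--                     'right': seq[n:]}
--         cbases = defaultdict(list)
--         for i in range(0, nbases):
--             # i = list(range(0, nbases))[0]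
--             for dir in segments.keys():
--                 cbases[dir].append(gapped_position(segments[dir], i))
--         return([None if i is None else n-1-i for i in cbases['left']],
--                [None if i is None else n+i for i in cbases['right']])
-- ===== SOURCE B (Python) =====
-- def closestbases(seq, n, nbases=1):
--     left = seq[:n][::-1]
--     right = seq[n:]
--     return ([None if i is None else n - 1 - i for i in _positions(left, nbases)],
--             [None if i is None else n + i for i in _positions(right, nbases)])
--
--
-- def _positions(seg, k):
--     """Indices of the first k ungapped characters of seg, padded with None to length k
--     (single pass over seg, stopping once k indices are collected)."""
--     idxs = []
--     for i, b in enumerate(seg):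
--         if len(idxs) >= k:
--             break
--         if b != '-':
--             idxs.append(i)
--     return idxs + [None] * (k - len(idxs))
-- ===== Notes on version B (the rewrite author's own statement) =====
-- stated objective: faster
-- what changed: Instead of calling gapped_position once per wanted base (each call rescanning the segment from its start), B makes a single pass over each segment collecting the indices of the first nbases ungapped characters and pads with None.
import Mathlib
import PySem

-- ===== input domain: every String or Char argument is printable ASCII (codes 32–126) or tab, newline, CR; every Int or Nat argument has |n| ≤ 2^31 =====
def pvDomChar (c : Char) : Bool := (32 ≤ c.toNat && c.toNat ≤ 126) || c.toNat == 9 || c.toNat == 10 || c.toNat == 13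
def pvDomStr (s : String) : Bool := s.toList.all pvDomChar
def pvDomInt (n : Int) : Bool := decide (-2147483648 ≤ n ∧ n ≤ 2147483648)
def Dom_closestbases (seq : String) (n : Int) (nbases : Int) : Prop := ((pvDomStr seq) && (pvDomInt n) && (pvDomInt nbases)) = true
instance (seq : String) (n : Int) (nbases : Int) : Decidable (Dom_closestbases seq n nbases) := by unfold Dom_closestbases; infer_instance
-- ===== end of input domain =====

-- B replaces A's O(nbases · |seq|) repeated rescans (one gapped_position scan per wanted base)
-- by a single pass per segment that collects the first nbases ungapped indices; objective: faster.

-- ===== PORT A =====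
-- gapped_position's loop: enumerate with the running count i and an early return
def gpGo : List (Int × Char) → Int → Int → Option Int
  | [], _, _ => none
  | (c, b) :: rest, n, i =>
    let i' := if b ≠ '-' then i + 1 else i
    if i' = n then some c else gpGo rest n i'

def gappedPosition (seg : List Char) (n : Int) : Option Int :=
  gpGo (PySem.List.enumerate seg 0) n (-1)

def closestbases (seq : String) (n : Int) (nbases : Int) : List (Option Int) × List (Option Int) :=
  let s := seq.toList
  -- seq[:n][::-1] and seq[n:] (s[::-1] is reverse: PySem.List.slice?_none_none_neg_one)
  let left := (PySem.List.slice s none (some n)).reverse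
  let right := PySem.List.slice s (some n) none
  -- for i in range(0, nbases): append gapped_position for each of the two dict keys
  let cbases := (PySem.List.pyRange 0 nbases).foldl
    (fun (acc : List (Option Int) × List (Option Int)) i =>
      (acc.1 ++ [gappedPosition left i], acc.2 ++ [gappedPosition right i]))
    ([], [])
  (cbases.1.map (fun i? => match i? with | none => none | some i => n - 1 - i),
   cbases.2.map (fun i? => match i? with | none => none | some i => n + i))

-- ===== PORT B =====
-- _positions' loop: collect indices of ungapped chars until nbases are found
def posGo (k : Int) : List (Int × Char) → List Int → List Int
  | [], idxs => idxs
  | (i, b) :: rest, idxs =>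
    if (idxs.length : Int) ≥ k then idxs
    else if b ≠ '-' then posGo k rest (idxs ++ [i]) else posGo k rest idxs

def positionsB (seg : List Char) (k : Int) : List (Option Int) :=
  let idxs := posGo k (PySem.List.enumerate seg 0) []
  -- idxs + [None] * (k - len(idxs))
  idxs.map some ++ List.replicate (k - idxs.length).toNat none

def closestbases_alt (seq : String) (n : Int) (nbases : Int) : List (Option Int) × List (Option Int) :=
  let s := seq.toList
  let left := (PySem.List.slice s none (some n)).reverse
  let right := PySem.List.slice s (some n) none
  ((positionsB left nbases).map (fun i? => match i? with | none => none | some i => n - 1 - i),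
   (positionsB right nbases).map (fun i? => match i? with | none => none | some i => n + i))

-- ===== PRECONDITION & SPEC =====
def Spec_closestbases (seq : String) (n : Int) (nbases : Int) (out : List (Option Int) × List (Option Int)) : Prop := out = closestbases_alt seq n nbases
instance (seq : String) (n : Int) (nbases : Int) (out : List (Option Int) × List (Option Int)) : Decidable (Spec_closestbases seq n nbases out) := by unfold Spec_closestbases; infer_instance

-- ===== CLAIM (what is proved, stated in full; the proofs are below) =====
def Claim_equal_closestbases : Prop := ∀ (seq : String) (n : Int) (nbases : Int), Dom_closestbases seq n nbases → Spec_closestbases seq n nbases (closestbases seq n nbases)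

-- ===== LEMMAS AND PROOFS =====

-- indices of the ungapped characters of an enumerated segment, in order
def nonGapIdx (l : List (Int × Char)) : List Int :=
  (l.filter (fun p => p.2 ≠ '-')).map Prod.fst

theorem gpGo_eq (l : List (Int × Char)) : ∀ (n i : Int), i < n →
    gpGo l n i = (nonGapIdx l)[(n - i - 1).toNat]? := by
  induction l with
  | nil => intro n i _; simp [gpGo, nonGapIdx]
  | cons p rest ih =>
    intro n i hlt
    obtain ⟨c, b⟩ := p
    by_cases hb : b = '-'
    · have hne : ¬ (i = n) := by omega
      simp [gpGo, nonGapIdx, hb, hne, ih n i hlt, nonGapIdx]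
    · by_cases hn : i + 1 = n
      · have h0 : (n - i - 1).toNat = 0 := by omega
        simp [gpGo, nonGapIdx, hb, hn, h0]
      · have h1 : i + 1 < n := by omega
        have h2 : (n - i - 1).toNat = (n - (i + 1) - 1).toNat + 1 := by omega
        simp [gpGo, nonGapIdx, hb, hn, ih n (i + 1) h1, nonGapIdx, h2]

theorem posGo_eq (k : Int) (l : List (Int × Char)) : ∀ (idxs : List Int),
    posGo k l idxs = idxs ++ (nonGapIdx l).take (k - idxs.length).toNat := by
  induction l with
  | nil => intro idxs; simp [posGo, nonGapIdx]
  | cons p rest ih =>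
    intro idxs
    obtain ⟨i, b⟩ := p
    by_cases hk : (idxs.length : Int) ≥ k
    · have h0 : (k - idxs.length).toNat = 0 := by omega
      simp [posGo, hk, h0]
    · by_cases hb : b = '-'
      · simp [posGo, hk, hb, nonGapIdx, ih idxs]
      · have h1 : (k - idxs.length).toNat = (k - (idxs.length + 1)).toNat + 1 := by omega
        simp [posGo, hk, hb, nonGapIdx, ih (idxs ++ [i]), h1, List.take_succ_cons]

theorem range_map_get_eq_take_pad (idxs : List Int) : ∀ (m : Nat),
    (List.range m).map (fun j => idxs[j]?) =
      (idxs.take m).map some ++ List.replicate (m - (idxs.take m).length) none := by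
  induction idxs with
  | nil =>
    intro m
    simp only [List.take_nil, List.map_nil, List.nil_append, List.length_nil, Nat.sub_zero,
      List.getElem?_nil]
    induction m with
    | zero => simp
    | succ m ihm => simp [List.range_succ, ihm, List.replicate_succ']
  | cons x rest ih =>
    intro m
    cases m with
    | zero => simp
    | succ m' =>
      simp [List.range_succ_eq_map, List.map_map, Function.comp_def, ih m']

theorem pyRange_zero_toNat (k : Int) :
    PySem.List.pyRange 0 k = (List.range k.toNat).map (fun (j : Nat) => (j : Int)) := by
  rcases le_or_gt 0 k with h | h
  · obtain ⟨m, rfl⟩ := Int.eq_ofNat_of_zero_le h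
    rw [Int.toNat_natCast]
    exact PySem.List.pyRange_zero_natCast m
  · have h1 : PySem.List.pyRange 0 k = [] := by
      have := PySem.List.length_pyRange_one (a := 0) (b := k)
      exact List.eq_nil_of_length_eq_zero (by omega)
    have h2 : k.toNat = 0 := by omega
    simp [h1, h2]

theorem pyRange_map_eq (k : Int) (f : Int → Option Int) :
    (PySem.List.pyRange 0 k).map f = (List.range k.toNat).map (fun (j : Nat) => f (j : Int)) := by
  rw [pyRange_zero_toNat, List.map_map]
  simp [Function.comp_def]

-- the core per-segment fact: A's list of gapped positions equals B's padded index list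
theorem segment_eq (seg : List Char) (k : Int) :
    (PySem.List.pyRange 0 k).map (fun i => gappedPosition seg i) = positionsB seg k := by
  set l := PySem.List.enumerate seg 0 with hl
  have hA : ∀ i ∈ PySem.List.pyRange 0 k,
      gappedPosition seg i = (nonGapIdx l)[(i - (-1) - 1).toNat]? := by
    intro i hi
    have : (-1 : Int) < i := by
      have := PySem.List.mem_pyRange_one.mp hi; omega
    exact gpGo_eq l i (-1) this
  rw [List.map_congr_left hA, pyRange_map_eq]
  have hfun : ∀ j ∈ List.range k.toNat, (nonGapIdx l)[((j : Int) - (-1) - 1).toNat]? = (nonGapIdx l)[j]? := by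
    intro j _
    congr 1
    omega
  rw [List.map_congr_left hfun, range_map_get_eq_take_pad]
  unfold positionsB
  rw [← hl, posGo_eq k l []]
  simp only [List.nil_append, List.length_nil, Nat.cast_zero, Int.sub_zero]
  congr 1
  congr 1
  simp only [List.length_take]
  omega

-- ===== VERDICT (by name: the statement is the Claim_ definition above) =====
theorem closestbases_spec : Claim_equal_closestbases := by
  intro seq n nbases _
  unfold Spec_closestbases closestbases closestbases_alt
  dsimp only
  rw [PySem.List.foldl_prod_mk
    (f := fun acc i => acc ++ [gappedPosition ((PySem.List.slice seq.toList none (some n)).reverse) i])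
    (g := fun acc i => acc ++ [gappedPosition (PySem.List.slice seq.toList (some n) none) i])]
  simp only [PySem.List.foldl_append_singleton_eq_map, List.nil_append]
  rw [segment_eq, segment_eq]
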